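-- pv_equiv track=rewrite | github.com/siavashraissi/RadGame | make_localize_test_scores.py | score_nonlocalizable
-- ===== SOURCE A (Python) =====
-- from typing import Dict, List, Tuple
--
-- def score_nonlocalizable(gt_nonloc: Dict[str, bool], user_nonloc: Dict[str, bool]):
--     correct = 0
--     incorrect = 0
--     for label, present in gt_nonloc.items():
--         if present:
--             if user_nonloc.get(label):
--                 correct += 1
--             else:
--                 incorrect += 1
--     for label, val in (user_nonloc or {}).items():
--         if val and not gt_nonloc.get(label):
--             incorrect += 1
--     return correct, incorrect
-- ===== SOURCE B (Python) =====
-- def score_nonlocalizable(gt_nonloc, user_nonloc):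
--     # Merge both sides into one presence-bitmask map: bit 1 = present in gt,
--     # bit 2 = marked by the user.  A label scores correct iff its mask is 3.
--     mask = {l: 1 for l, v in gt_nonloc.items() if v}
--     for l, v in (user_nonloc or {}).items():
--         if v:
--             mask[l] = mask.get(l, 0) | 2
--     correct = sum(1 for m in mask.values() if m == 3)
--     return correct, len(mask) - correct
-- ===== Notes on version B (the rewrite author's own statement) =====
-- stated objective: alternative
-- what changed: B merges both inputs into one label->bitmask dict (bit 1 = present in gt, bit 2 = marked by user) and classifies labels by mask value (correct = masks equal to 3, incorrect = the rest), eliminating A's cross-dict .get lookups and its two counters.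
import Mathlib
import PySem

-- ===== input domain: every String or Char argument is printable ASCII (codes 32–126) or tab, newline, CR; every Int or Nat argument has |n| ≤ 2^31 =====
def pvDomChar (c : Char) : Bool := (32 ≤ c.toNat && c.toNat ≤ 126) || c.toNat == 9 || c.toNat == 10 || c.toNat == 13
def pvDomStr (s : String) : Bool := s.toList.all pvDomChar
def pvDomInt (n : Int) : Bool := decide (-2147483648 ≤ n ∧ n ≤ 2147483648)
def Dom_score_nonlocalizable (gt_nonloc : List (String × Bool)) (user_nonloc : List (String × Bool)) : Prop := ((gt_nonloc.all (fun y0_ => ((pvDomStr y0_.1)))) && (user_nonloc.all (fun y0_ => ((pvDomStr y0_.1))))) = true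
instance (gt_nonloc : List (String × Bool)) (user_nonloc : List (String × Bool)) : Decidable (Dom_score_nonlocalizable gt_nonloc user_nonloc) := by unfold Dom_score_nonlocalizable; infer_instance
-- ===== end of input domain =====

-- B merges both inputs into one label->bitmask dict (bit 1 = gt-present, bit 2 = user-marked)
-- and classifies labels by mask value; equivalence is about the return value.
-- ===== PORT A =====
def score_nonlocalizable (gt_nonloc : List (String × Bool)) (user_nonloc : List (String × Bool)) : Int × Int :=
  let userD : PySem.Dict String Bool := PySem.Dict.mk user_nonloc
  let gtD : PySem.Dict String Bool := PySem.Dict.mk gt_nonloc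
  -- for label, present in gt_nonloc.items(): …
  let ci : Int × Int := gt_nonloc.foldl (fun s p =>
    if p.2 then
      (if userD.getD p.1 false then (s.1 + 1, s.2) else (s.1, s.2 + 1))
    else s) (0, 0)
  -- for label, val in (user_nonloc or {}).items(): …  ('or {}' changes nothing: iterating an empty dict is iterating {})
  let incorrect : Int := user_nonloc.foldl (fun i p =>
    if p.2 && !(gtD.getD p.1 false) then i + 1 else i) ci.2
  (ci.1, incorrect)

-- ===== PORT B =====
def score_nonlocalizable_alt (gt_nonloc : List (String × Bool)) (user_nonloc : List (String × Bool)) : Int × Int :=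
  -- mask = {l: 1 for l, v in gt_nonloc.items() if v}
  let mask0 : PySem.Dict String Int :=
    (gt_nonloc.filter (·.2)).foldl (fun d p => d.insert p.1 1) PySem.Dict.empty
  -- for l, v in (user_nonloc or {}).items(): if v: mask[l] = mask.get(l, 0) | 2
  let mask : PySem.Dict String Int :=
    user_nonloc.foldl (fun d p => if p.2 then d.insert p.1 (Int.lor (d.getD p.1 0) 2) else d) mask0
  -- correct = sum(1 for m in mask.values() if m == 3)
  let correct : Int := ((mask.values.filter (fun m => m == 3)).length : Int)
  -- return correct, len(mask) - correct
  (correct, (mask.size : Int) - correct)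

-- ===== PRECONDITION & SPEC =====
-- Pre_ excludes lists with duplicate keys: the arguments are Python dicts, whose key lists are always duplicate-free.
def Pre_score_nonlocalizable (gt_nonloc : List (String × Bool)) (user_nonloc : List (String × Bool)) : Prop :=
  (gt_nonloc.map Prod.fst).Nodup ∧ (user_nonloc.map Prod.fst).Nodup
instance (gt_nonloc : List (String × Bool)) (user_nonloc : List (String × Bool)) : Decidable (Pre_score_nonlocalizable gt_nonloc user_nonloc) := by unfold Pre_score_nonlocalizable; infer_instance
def pvWitness_score_nonlocalizable : (List (String × Bool)) × (List (String × Bool)) :=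
  ([("a", true), ("b", false)], [("a", true), ("c", true)])
def Spec_score_nonlocalizable (gt_nonloc : List (String × Bool)) (user_nonloc : List (String × Bool)) (out : Int × Int) : Prop := out = score_nonlocalizable_alt gt_nonloc user_nonloc
instance (gt_nonloc : List (String × Bool)) (user_nonloc : List (String × Bool)) (out : Int × Int) : Decidable (Spec_score_nonlocalizable gt_nonloc user_nonloc out) := by unfold Spec_score_nonlocalizable; infer_instance

-- ===== CLAIM (what is proved, stated in full; the proofs are below) =====
def Claim_equal_score_nonlocalizable : Prop := ∀ (gt_nonloc : List (String × Bool)) (user_nonloc : List (String × Bool)), Dom_score_nonlocalizable gt_nonloc user_nonloc → Pre_score_nonlocalizable gt_nonloc user_nonloc → Spec_score_nonlocalizable gt_nonloc user_nonloc (score_nonlocalizable gt_nonloc user_nonloc)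

-- ===== LEMMAS AND PROOFS =====

-- A's first loop splits into two countP's
lemma loopA_eq (d : PySem.Dict String Bool) (l : List (String × Bool)) (c i : Int) :
    l.foldl (fun s p =>
      if p.2 then
        (if d.getD p.1 false then (s.1 + 1, s.2) else (s.1, s.2 + 1))
      else s) (c, i)
    = (c + (l.countP (fun p => p.2 && d.getD p.1 false) : Int),
       i + (l.countP (fun p => p.2 && !(d.getD p.1 false)) : Int)) := by
  induction l generalizing c i with
  | nil => simp
  | cons h t ih =>
    simp only [List.foldl_cons, List.countP_cons]
    by_cases hp : h.2 <;> by_cases hd : d.getD h.1 false = true <;>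
      simp [hp, hd, ih] <;> ring

-- A's second loop is a countP
lemma loopA2_eq (d : PySem.Dict String Bool) (l : List (String × Bool)) (i : Int) :
    l.foldl (fun i p => if p.2 && !(d.getD p.1 false) then i + 1 else i) i
    = i + (l.countP (fun p => p.2 && !(d.getD p.1 false)) : Int) := by
  induction l generalizing i with
  | nil => simp
  | cons h t ih =>
    simp only [List.foldl_cons, List.countP_cons]
    by_cases hp : (h.2 && !(d.getD h.1 false)) = true
    · rw [if_pos hp, ih]; simp [hp]; ring
    · rw [if_neg hp, ih]; simp [hp]

-- membership in the present-label set is exactly a truthy dict lookup (keys Nodup)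
lemma mem_present_iff (l : List (String × Bool)) (hn : (l.map Prod.fst).Nodup) (x : String) :
    x ∈ (l.filter (·.2)).map (·.1) ↔ (PySem.Dict.mk l).getD x false = true := by
  have hkeys : (PySem.Dict.mk l).keys.Nodup := hn
  constructor
  · intro hx
    simp only [List.mem_map, List.mem_filter] at hx
    obtain ⟨p, ⟨hpl, hp2⟩, rfl⟩ := hx
    have hitem : (p.1, true) ∈ (PySem.Dict.mk l).items := by
      have : p = (p.1, true) := by
        obtain ⟨a, b⟩ := p; simp only at hp2; simp [hp2]
      rw [← this]; exact hpl
    exact PySem.Dict.getD_of_mem_items _ hitem hkeys false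
  · intro h
    have hg : (PySem.Dict.mk l).get? x = some true := by
      rcases hget : (PySem.Dict.mk l).get? x with _ | b
      · rw [PySem.Dict.getD_of_get?_eq_none _ false hget] at h; exact absurd h (by simp)
      · rw [PySem.Dict.getD_of_get?_eq_some _ false hget] at h; simp [h]
    have := PySem.Dict.mem_items_of_get?_eq_some _ hg
    simp only [List.mem_map, List.mem_filter]
    exact ⟨(x, true), ⟨this, rfl⟩, rfl⟩

-- countP splits along a second boolean predicate
lemma countP_split (l : List (String × Bool)) (p q : String × Bool → Bool) :
    l.countP p = l.countP (fun a => p a && q a) + l.countP (fun a => p a && !q a) := by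
  induction l with
  | nil => simp
  | cons h t ih =>
    simp only [List.countP_cons]
    by_cases hp : p h = true <;> by_cases hq : q h = true <;> simp [hp, hq, ih] <;> omega

-- B's dict comprehension inserts fresh distinct keys, so its items list is a map
lemma mask0_items (gt : List (String × Bool)) (hg : (gt.map Prod.fst).Nodup) :
    ((gt.filter (·.2)).foldl (fun d p => d.insert p.1 1) (PySem.Dict.empty : PySem.Dict String Int)).items
      = (gt.filter (·.2)).map (fun p => (p.1, (1 : Int))) := by
  have hn : ((gt.filter (·.2)).map Prod.fst).Nodup :=
    hg.sublist (List.Sublist.map Prod.fst List.filter_sublist)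
  have := PySem.Dict.items_foldl_insert_fresh (l := gt.filter (·.2)) (k := Prod.fst)
    (v := fun _ => (1 : Int)) (d := PySem.Dict.empty)
    (by intro a _; simp [PySem.Dict.contains_empty]) hn
  simpa using this

-- intersection cardinality is symmetric for nodup lists
lemma filter_mem_length_comm (l1 l2 : List String) (h1 : l1.Nodup) (h2 : l2.Nodup) :
    (l1.filter (fun x => decide (x ∈ l2))).length = (l2.filter (fun x => decide (x ∈ l1))).length := by
  rw [← List.toFinset_card_of_nodup (h1.filter _), ← List.toFinset_card_of_nodup (h2.filter _)]
  congr 1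
  apply Finset.ext
  intro x
  simp [List.mem_toFinset, and_comm]

lemma countP_replace (l : List (String × Int)) (k : String) (v w : Int)
    (hn : (l.map Prod.fst).Nodup) (hmem : (k, w) ∈ l) (q : Int → Bool) :
    (l.map (fun p => if p.1 == k then (k, v) else p)).countP (fun p => q p.2)
      + (if q w then 1 else 0)
    = l.countP (fun p => q p.2) + (if q v then 1 else 0) := by
  induction l with
  | nil => simp at hmem
  | cons h t ih =>
    simp only [List.nodup_cons, List.map] at hn
    obtain ⟨hh, ht⟩ := hn
    rcases List.mem_cons.mp hmem with heq | hmemt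
    · have hmap : t.map (fun p => if p.1 == k then (k, v) else p) = t := by
        rw [show t = t.map id from (List.map_id t).symm, List.map_map]
        apply List.map_congr_left
        intro p hp
        have hpk : p.1 ≠ k := fun hk =>
          hh (by rw [← heq]; exact List.mem_map.mpr ⟨p, hp, hk⟩)
        simp [hpk]
      simp only [List.map_cons, ← heq, List.countP_cons, hmap]
      by_cases hv : q v <;> by_cases hw : q w <;> simp [hv, hw]
    · have hne : h.1 ≠ k := fun hk =>
        hh (List.mem_map.mpr ⟨(k, w), hmemt, by simp [hk]⟩)
      simp only [List.map_cons, List.countP_cons]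
      rw [show (if (h.1 == k) = true then (k, v) else h) = h from by simp [hne]]
      have := ih ht hmemt
      omega

lemma loop2_eq (u : List (String × Bool)) (d : PySem.Dict String Int)
    (hu : (u.map Prod.fst).Nodup) (hd : d.keys.Nodup)
    (hv : ∀ v ∈ d.values, v = 1 ∨ v = 2 ∨ v = 3) :
    (u.foldl (fun d p => if p.2 then d.insert p.1 (Int.lor (d.getD p.1 0) 2) else d) d).values.countP (· == 3)
        = d.values.countP (· == 3) + u.countP (fun p => p.2 && (d.get? p.1 == some 1))
    ∧ (u.foldl (fun d p => if p.2 then d.insert p.1 (Int.lor (d.getD p.1 0) 2) else d) d).size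
        = d.size + u.countP (fun p => p.2 && !(d.contains p.1)) := by
  induction u generalizing d with
  | nil => simp
  | cons p t ih =>
    simp only [List.nodup_cons, List.map] at hu
    obtain ⟨hp1, ht⟩ := hu
    simp only [List.foldl_cons, List.countP_cons]
    by_cases hp : p.2 = true
    · rw [if_pos hp]
      set d1 := d.insert p.1 (Int.lor (d.getD p.1 0) 2) with hd1
      have hd1n : d1.keys.Nodup := PySem.Dict.nodup_keys_insert _ _ _ hd
      have hv1 : ∀ v ∈ d1.values, v = 1 ∨ v = 2 ∨ v = 3 := by
        intro v hvv
        rcases PySem.Dict.mem_values_insert _ _ _ _ hvv with hveq | hvold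
        · subst hveq
          rcases hget : d.get? p.1 with _ | w
          · rw [PySem.Dict.getD_of_get?_eq_none _ 0 hget]; right; left; decide
          · rw [PySem.Dict.getD_of_get?_eq_some _ 0 hget]
            have hw : w ∈ d.values := by
              have := PySem.Dict.mem_items_of_get?_eq_some _ hget
              exact List.mem_map.mpr ⟨(p.1, w), this, rfl⟩
            rcases hv w hw with rfl | rfl | rfl
            · right; right; decide
            · right; left; decide
            · right; right; decide
        · exact hv v hvold
      obtain ⟨ih3, ihs⟩ := ih d1 ht hd1n hv1
      -- rewrite tail countPs from d1 back to d
      have hc3 : t.countP (fun q => q.2 && (d1.get? q.1 == some 1))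
          = t.countP (fun q => q.2 && (d.get? q.1 == some 1)) := by
        apply List.countP_congr
        intro q hq
        have : q.1 ≠ p.1 := fun h => hp1 (List.mem_map.mpr ⟨q, hq, h⟩)
        rw [hd1, PySem.Dict.get?_insert_of_ne _ _ this]
      have hcs : t.countP (fun q => q.2 && !(d1.contains q.1))
          = t.countP (fun q => q.2 && !(d.contains q.1)) := by
        apply List.countP_congr
        intro q hq
        have hne : q.1 ≠ p.1 := fun h => hp1 (List.mem_map.mpr ⟨q, hq, h⟩)
        rw [hd1, PySem.Dict.contains_insert]
        simp [hne]
      rw [ih3, ihs, hc3, hcs]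
      -- head contribution
      by_cases hc : d.contains p.1 = true
      · -- overwrite in place
        have hsome : ∃ w, d.get? p.1 = some w := by
          rcases hget : d.get? p.1 with _ | w
          · rw [PySem.Dict.get?_eq_none_iff_contains] at hget; simp [hget] at hc
          · exact ⟨w, rfl⟩
        obtain ⟨w, hget⟩ := hsome
        have hw : w ∈ d.values := by
          have := PySem.Dict.mem_items_of_get?_eq_some _ hget
          exact List.mem_map.mpr ⟨(p.1, w), this, rfl⟩
        have hmem : (p.1, w) ∈ d.items := PySem.Dict.mem_items_of_get?_eq_some _ hget
        have h3 : d1.values.countP (· == 3) + (if ((w : Int) == 3) then 1 else 0)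
            = d.values.countP (· == 3) + (if ((Int.lor (d.getD p.1 0) 2) == 3) then 1 else 0) := by
          have hitems : d1.items = d.items.map
              (fun q => if q.1 == p.1 then (p.1, Int.lor (d.getD p.1 0) 2) else q) :=
            PySem.Dict.items_insert_of_contains _ _ hc
          have := countP_replace d.items p.1 (Int.lor (d.getD p.1 0) 2) w hd hmem (· == 3)
          calc d1.values.countP (· == 3) + _
              = (d.items.map (fun q => if q.1 == p.1 then (p.1, Int.lor (d.getD p.1 0) 2) else q)).countP
                  (fun q => q.2 == 3) + (if ((w : Int) == 3) then 1 else 0) := by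
                rw [show d1.values = d1.items.map (·.2) from rfl, hitems, List.countP_map]; rfl
            _ = d.items.countP (fun q => q.2 == 3) + _ := this
            _ = d.values.countP (· == 3) + _ := by
                rw [show d.values = d.items.map (·.2) from rfl, List.countP_map]; rfl
        have hsize : d1.size = d.size := by
          rw [hd1, PySem.Dict.size_insert]
          simp [hc]
        rw [PySem.Dict.getD_of_get?_eq_some _ 0 hget] at h3
        rw [hsize]
        constructor
        · rcases hv w hw with rfl | rfl | rfl
          · simp [hget, hp] at h3 ⊢
            have : Int.lor 1 2 = 3 := by decide
            rw [this] at h3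
            simp at h3
            omega
          · simp [hget, hp] at h3 ⊢
            have : Int.lor 2 2 = 2 := by decide
            rw [this] at h3
            simp at h3
            omega
          · simp [hget, hp] at h3 ⊢
            have : Int.lor 3 2 = 3 := by decide
            rw [this] at h3
            simp at h3
            omega
        · simp [hc]
      · -- fresh key appends value 2
        have hget : d.get? p.1 = none := by
          rw [PySem.Dict.get?_eq_none_iff_contains]
          simpa using hc
        have hitems : d1.items = d.items ++ [(p.1, Int.lor (d.getD p.1 0) 2)] :=
          PySem.Dict.items_insert_of_not_contains _ _ (by simpa using hc)
        have hval : Int.lor (d.getD p.1 0) 2 = 2 := by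
          rw [PySem.Dict.getD_of_get?_eq_none _ 0 hget]; decide
        constructor
        · have : d1.values = d.values ++ [2] := by
            rw [show d1.values = d1.items.map (·.2) from rfl, hitems, List.map_append, hval]; rfl
          rw [this]
          simp [hget, hp]
        · have : d1.size = d.size + 1 := by
            rw [show d1.size = d1.items.length from rfl, hitems]; simp; rfl
          rw [this]
          simp [hc, hp]
          omega
    · simp only [hp]
      simp only [Bool.false_and, if_neg (by simp : ¬ (false = true))]
      have := ih d ht hd hv
      simpa [hp] using this

-- the shared intersection count, both ways round
lemma correct_comm (gt user : List (String × Bool))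
    (hg : (gt.map Prod.fst).Nodup) (hu : (user.map Prod.fst).Nodup) :
    user.countP (fun p => p.2 && (PySem.Dict.mk gt).getD p.1 false)
      = gt.countP (fun p => p.2 && (PySem.Dict.mk user).getD p.1 false) := by
  have key : ∀ (a b : List (String × Bool)), (a.map Prod.fst).Nodup → (b.map Prod.fst).Nodup →
      a.countP (fun p => p.2 && (PySem.Dict.mk b).getD p.1 false)
        = (((a.filter (·.2)).map (·.1)).filter
            (fun x => decide (x ∈ (b.filter (·.2)).map (·.1)))).length := by
    intro a b ha hb
    rw [← List.countP_eq_length_filter, List.countP_map, List.countP_filter]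
    apply List.countP_congr
    intro p _
    by_cases h2 : p.2 = true
    · by_cases hm : p.1 ∈ (b.filter (·.2)).map (·.1)
      · have h := (mem_present_iff b hb p.1).mp hm
        simp [h2, hm, h, Function.comp]
      · have h : (PySem.Dict.mk b).getD p.1 false = false :=
          Bool.eq_false_iff.mpr (fun h => hm ((mem_present_iff b hb p.1).mpr h))
        simp [h2, hm, h, Function.comp]
    · simp [h2, Function.comp]
  rw [key user gt hu hg, key gt user hg hu]
  apply filter_mem_length_comm
  · exact hu.sublist (List.Sublist.map Prod.fst List.filter_sublist)
  · exact hg.sublist (List.Sublist.map Prod.fst List.filter_sublist)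

-- the two ports agree under Nodup keys
lemma ports_agree (gt user : List (String × Bool))
    (hg : (gt.map Prod.fst).Nodup) (hu : (user.map Prod.fst).Nodup) :
    score_nonlocalizable gt user = score_nonlocalizable_alt gt user := by
  unfold score_nonlocalizable score_nonlocalizable_alt
  simp only []
  rw [loopA_eq, loopA2_eq]
  set F := gt.filter (·.2) with hF
  set mask0 : PySem.Dict String Int := F.foldl (fun d p => d.insert p.1 1) PySem.Dict.empty with hm0def
  have hm0 : mask0.items = F.map (fun p => (p.1, (1 : Int))) := mask0_items gt hg
  have hFk : (F.map (·.1) : List String).Nodup :=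
    hg.sublist (List.Sublist.map Prod.fst List.filter_sublist)
  have hkeys : mask0.keys = F.map (·.1) := by
    simp only [PySem.Dict.keys, hm0, List.map_map]; rfl
  have hknd : mask0.keys.Nodup := by rw [hkeys]; exact hFk
  have hvals : mask0.values = F.map (fun _ => (1 : Int)) := by
    simp only [PySem.Dict.values, hm0, List.map_map]; rfl
  have hv1 : ∀ v ∈ mask0.values, v = 1 ∨ v = 2 ∨ v = 3 := by
    intro v hvv; rw [hvals] at hvv
    rcases List.mem_map.mp hvv with ⟨_, _, rfl⟩; left; rfl
  have hget1 : ∀ x, (mask0.get? x == some 1) = (PySem.Dict.mk gt).getD x false := by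
    intro x
    by_cases hx : x ∈ F.map (·.1)
    · rcases List.mem_map.mp hx with ⟨p, hp, rfl⟩
      have hit : (p.1, (1 : Int)) ∈ mask0.items := by
        rw [hm0]; exact List.mem_map.mpr ⟨p, hp, rfl⟩
      rw [PySem.Dict.get?_of_mem_items _ hit hknd]
      rw [(mem_present_iff gt hg p.1).mp hx]
      rfl
    · have hnone : mask0.get? x = none := by
        rw [PySem.Dict.get?_eq_none_iff_not_mem_keys, hkeys]; exact hx
      rw [hnone]
      have h2 : ¬ (PySem.Dict.mk gt).getD x false = true :=
        fun h => hx ((mem_present_iff gt hg x).mpr h)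
      simp [Bool.eq_false_iff.mpr h2]
  have hcont : ∀ x, mask0.contains x = (PySem.Dict.mk gt).getD x false := by
    intro x
    by_cases hx : x ∈ F.map (·.1)
    · have h1 : mask0.contains x = true :=
        (PySem.Dict.contains_iff_mem_keys _ _).mpr (by rw [hkeys]; exact hx)
      rw [h1, (mem_present_iff gt hg x).mp hx]
    · have h1 : mask0.contains x = false := by
        by_contra h
        exact hx (by rw [← hkeys]
                     exact (PySem.Dict.contains_iff_mem_keys _ _).mp (by simpa using h))
      have h2 : ¬ (PySem.Dict.mk gt).getD x false = true :=
        fun h => hx ((mem_present_iff gt hg x).mpr h)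
      rw [h1, Bool.eq_false_iff.mpr h2]
  obtain ⟨h3, hs⟩ := loop2_eq user mask0 hu hknd hv1
  have hcnt3 : mask0.values.countP (· == 3) = 0 := by
    rw [hvals, List.countP_map]
    simp [Function.comp]
  have hsz : mask0.size = F.length := by
    simp only [PySem.Dict.size, hm0, List.length_map]
  have hpc : user.countP (fun p => p.2 && (mask0.get? p.1 == some 1))
      = user.countP (fun p => p.2 && (PySem.Dict.mk gt).getD p.1 false) :=
    List.countP_congr (fun p _ => by rw [hget1])
  have hpcn : user.countP (fun p => p.2 && !(mask0.contains p.1))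
      = user.countP (fun p => p.2 && !((PySem.Dict.mk gt).getD p.1 false)) :=
    List.countP_congr (fun p _ => by rw [hcont])
  have hFlen : F.length = gt.countP (·.2) := List.countP_eq_length_filter.symm
  have hsplit := countP_split gt (·.2) (fun a => (PySem.Dict.mk user).getD a.1 false)
  have hcomm := correct_comm gt user hg hu
  simp only [Prod.mk.injEq]
  rw [← List.countP_eq_length_filter, h3, hcnt3, hpc, hs, hsz, hFlen, hpcn]
  constructor
  · rw [hcomm]; push_cast; ring
  · rw [hsplit, ← hcomm]; push_cast; ring

-- ===== VERDICT =====
theorem score_nonlocalizable_spec : Claim_equal_score_nonlocalizable := by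
  intro gt user _ hpre
  exact ports_agree gt user hpre.1 hpre.2
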